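-- pv_equiv track=rewrite | github.com/Sushi22/Anteambulo | crawl/fetch_metrics.py | get_expr_variables
-- ===== SOURCE A (Python) =====
-- def get_expr_variables(query_expr):
--     variables = []
--     for ind in range(len(query_expr)):
--         if ind < len(query_expr)-1 and query_expr[ind] == '"' and query_expr[ind+1] == '$':
--             j = ind+2
--             word = ""
--             while query_expr[j] != '"':
--                 word = word + query_expr[j]
--                 j = j+1
--             variables.append(word)
--             ind = j
--
--     return variables
-- ===== SOURCE B (Python) =====
-- def get_expr_variables(query_expr):
--     pieces = query_expr.split('"')
--     variables = []
--     for seg in pieces[1:-1]: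
--         if seg.startswith('$'):
--             variables.append(seg[1:])
--     return variables
-- ===== Notes on version B (the rewrite author's own statement) =====
-- stated objective: simpler
-- what changed: Replaces A's index-by-index scan with an inner character-collecting while loop by a single split on the double-quote character followed by filtering the interior segments that begin with a dollar sign.
import Mathlib
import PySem

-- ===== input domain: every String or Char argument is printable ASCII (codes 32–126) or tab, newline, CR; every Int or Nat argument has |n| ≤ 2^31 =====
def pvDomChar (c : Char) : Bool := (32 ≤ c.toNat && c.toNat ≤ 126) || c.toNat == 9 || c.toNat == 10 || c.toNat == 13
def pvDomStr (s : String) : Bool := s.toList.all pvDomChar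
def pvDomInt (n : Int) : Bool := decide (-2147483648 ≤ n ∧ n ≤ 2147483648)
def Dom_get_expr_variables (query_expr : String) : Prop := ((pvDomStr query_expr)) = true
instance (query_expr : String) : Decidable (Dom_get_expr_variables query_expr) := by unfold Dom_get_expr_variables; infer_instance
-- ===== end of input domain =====

-- B replaces A's index-by-index scan (with an inner character-collecting while loop) by one
-- split on the double-quote character followed by a filter of the interior segments that begin
-- with a dollar sign (objective: simpler; a timing run measured B faster).

-- ===== PORT A =====
-- inner while loop of A: collect characters until the next '"' (Python raises IndexError
-- at end of string; Pre_ excludes that, so the [] result there is never relied upon)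
def pvGrab : List Char → List Char
  | [] => []
  | c :: rest => if c = '"' then [] else c :: pvGrab rest

-- outer for loop of A: visit every index; at `"` followed by `$` collect the word from two
-- characters further on (the assignment `ind = j` in A has no effect on the range iterator)
def pvScanA : List Char → List (List Char)
  | [] => []
  | c :: rest =>
      if c = '"' ∧ rest.head? = some '$' then pvGrab rest.tail :: pvScanA rest
      else pvScanA rest

def get_expr_variables (query_expr : String) : List String :=
  (pvScanA query_expr.toList).map String.ofList

-- ===== PORT B =====
def get_expr_variables_alt (query_expr : String) : List String :=
  (PySem.List.slice (PySem.Chars.splitOn query_expr.toList ['"']) (some 1) (some (-1))).foldl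
    (fun acc seg =>
      if PySem.Chars.startswith seg ['$']
      then acc ++ [String.ofList (PySem.Chars.slice seg (some 1) none)]
      else acc) []

-- ===== PRECONDITION & SPEC =====
-- Pre_ excludes exactly the strings with an unterminated `"$…` tail, on which A's inner
-- while loop runs off the end of the string and raises IndexError.
def Pre_get_expr_variables (query_expr : String) : Prop :=
  ∀ i < query_expr.toList.length,
    query_expr.toList[i]? = some '"' →
    query_expr.toList[i+1]? = some '$' →
    '"' ∈ query_expr.toList.drop (i+2)
instance (query_expr : String) : Decidable (Pre_get_expr_variables query_expr) := by unfold Pre_get_expr_variables; infer_instance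
def pvWitness_get_expr_variables : String := "\"$x\" < \"$y\""

def Spec_get_expr_variables (query_expr : String) (out : List String) : Prop := out = get_expr_variables_alt query_expr
instance (query_expr : String) (out : List String) : Decidable (Spec_get_expr_variables query_expr out) := by unfold Spec_get_expr_variables; infer_instance

-- ===== CLAIM (what is proved, stated in full; the proofs are below) =====
def Claim_equal_get_expr_variables : Prop := ∀ (query_expr : String), Dom_get_expr_variables query_expr → Pre_get_expr_variables query_expr → Spec_get_expr_variables query_expr (get_expr_variables query_expr)

-- ===== LEMMAS AND PROOFS =====

-- structural form of splitting on '"'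
def pvSp : List Char → List (List Char)
  | [] => [[]]
  | c :: rest => if c = '"' then [] :: pvSp rest else (pvSp rest).modifyHead (c :: ·)

-- pick the '$'-headed segments lying between two adjacent quotes
def pvG : List (List Char) → List (List Char)
  | [] => []
  | [_] => []
  | [_, _] => []
  | _ :: p :: q :: rest =>
      (if p.head? = some '$' then [p.tail] else []) ++ pvG (p :: q :: rest)

lemma pvSp_ne_nil (cs : List Char) : pvSp cs ≠ [] := by
  induction cs with
  | nil => simp [pvSp]
  | cons c rest ih =>
      simp only [pvSp]
      split
      · simp
      · intro h
        apply ih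
        simpa using congrArg List.length h

lemma pvSp_head (cs : List Char) : (pvSp cs).head? = some (cs.takeWhile (· ≠ '"')) := by
  induction cs with
  | nil => simp [pvSp]
  | cons c rest ih =>
      simp only [pvSp, List.takeWhile_cons]
      by_cases h : c = '"'
      · simp [h]
      · simp [h, List.head?_modifyHead, ih]

lemma pvSp_len (cs : List Char) : 1 < (pvSp cs).length ↔ '"' ∈ cs := by
  induction cs with
  | nil => simp [pvSp]
  | cons c rest ih =>
      simp only [pvSp, List.mem_cons]
      by_cases h : c = '"'
      · have := List.length_pos_iff.mpr (pvSp_ne_nil rest)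
        simp [h]
        omega
      · simp only [List.length_modifyHead, ih, if_neg h]
        constructor
        · exact fun hm => Or.inr hm
        · rintro (hh | hm)
          · exact absurd hh.symm h
          · exact hm

lemma pvG_modifyHead (f : List Char → List Char) (l : List (List Char)) :
    pvG (l.modifyHead f) = pvG l := by
  match l with
  | [] => rfl
  | [_] => rfl
  | [_, _] => rfl
  | _ :: _ :: _ :: _ => rfl

lemma pvSplitOn_go_spec (fuel : Nat) (l cur : List Char) (acc : List (List Char))
    (h : l.length ≤ fuel) :
    PySem.Chars.splitOn.go ['"'] fuel l cur acc
      = acc.reverse ++ (pvSp l).modifyHead (cur.reverse ++ ·) := by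
  induction fuel generalizing l cur acc with
  | zero =>
      have : l = [] := List.eq_nil_of_length_eq_zero (by omega)
      subst this
      simp [PySem.Chars.splitOn.go, pvSp]
  | succ fuel ih =>
      match l with
      | [] => simp [PySem.Chars.splitOn.go, pvSp]
      | c :: rest =>
          simp only [PySem.Chars.splitOn.go, pvSp]
          by_cases hc : c = '"'
          · have hpre : ['"'].isPrefixOf (c :: rest) = true := by
              simp [List.isPrefixOf, hc]
            rw [if_pos hpre]
            have hdrop : List.drop (['"'].length) (c :: rest) = rest := by simp
            rw [hdrop]
            rw [ih rest [] (cur.reverse :: acc) (by simpa using Nat.le_of_succ_le_succ h)]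
            rcases hsp : pvSp rest with _ | ⟨p, ps⟩
            · exact absurd hsp (pvSp_ne_nil rest)
            · simp [hc]
          · have hpre : ['"'].isPrefixOf (c :: rest) = false := by
              simp [List.isPrefixOf]
              exact fun hh => hc hh.symm
            rw [if_neg (by simp [hpre])]
            rw [ih rest (c :: cur) acc (by simpa using Nat.le_of_succ_le_succ h)]
            rw [if_neg hc]
            rcases hsp : pvSp rest with _ | ⟨p, ps⟩
            · exact absurd hsp (pvSp_ne_nil rest)
            · simp

lemma pvSplitOn_eq_pvSp (cs : List Char) :
    PySem.Chars.splitOn cs ['"'] = pvSp cs := by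
  rw [PySem.Chars.splitOn, pvSplitOn_go_spec cs.length.succ cs [] [] (by omega)]
  rcases hsp : pvSp cs with _ | ⟨p, ps⟩
  · exact absurd hsp (pvSp_ne_nil cs)
  · simp

lemma pvGrab_eq_takeWhile (cs : List Char) : pvGrab cs = cs.takeWhile (· ≠ '"') := by
  induction cs with
  | nil => rfl
  | cons c rest ih =>
      simp only [pvGrab, List.takeWhile_cons]
      by_cases h : c = '"' <;> simp [h, ih]

-- A's scan computes exactly the '$'-headed interior segments of the quote-split,
-- provided no `"$…` token is unterminated
lemma pvScanA_eq_pvG (cs : List Char)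
    (hpre : ∀ i < cs.length, cs[i]? = some '"' → cs[i+1]? = some '$' →
      '"' ∈ cs.drop (i+2)) :
    pvScanA cs = pvG (pvSp cs) := by
  induction cs with
  | nil => rfl
  | cons c rest ih =>
      have hrest : ∀ i < rest.length, rest[i]? = some '"' →
          rest[i+1]? = some '$' → '"' ∈ rest.drop (i+2) := by
        intro i hi h1 h2
        have := hpre (i+1) (by simp; omega) (by simpa using h1) (by simpa using h2)
        simpa using this
      have ihr := ih hrest
      simp only [pvScanA]
      by_cases hmatch : c = '"' ∧ rest.head? = some '$'
      · obtain ⟨hc, hh⟩ := hmatch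
        rcases rest with _ | ⟨d, rest2⟩
        · simp at hh
        · have hd : d = '$' := by simpa using hh
          subst hc hd
          -- Pre at index 0 gives a closing quote inside rest2
          have hmem : '"' ∈ rest2 := by
            have := hpre 0 (by simp) (by simp) (by simp)
            simpa using this
          rw [if_pos ⟨rfl, rfl⟩]
          -- decompose pvSp rest2
          rcases hsp2 : pvSp rest2 with _ | ⟨w, ps⟩
          · exact absurd hsp2 (pvSp_ne_nil rest2)
          rcases ps with _ | ⟨p2, ps'⟩
          · exfalso
            have := (pvSp_len rest2).mpr hmem
            rw [hsp2] at this
            simp at this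
          have hw : w = rest2.takeWhile (· ≠ '"') := by
            have := pvSp_head rest2
            rw [hsp2] at this
            simpa using this
          have hsp1 : pvSp ('$' :: rest2) = ('$' :: w) :: p2 :: ps' := by
            simp only [pvSp]
            rw [if_neg (by decide), hsp2]
            rfl
          have hsp0 : pvSp ('"' :: '$' :: rest2) = [] :: ('$' :: w) :: p2 :: ps' := by
            simp [pvSp, hsp2]
          rw [hsp0]
          show pvGrab rest2 :: pvScanA ('$' :: rest2) = _
          rw [pvG]
          simp only [List.head?_cons, List.tail_cons]
          rw [ihr, hsp1, pvGrab_eq_takeWhile, hw]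
          rfl
      · rw [if_neg hmatch]
        by_cases hc : c = '"'
        · -- quote not followed by '$'
          have hh : rest.head? ≠ some '$' := fun h => hmatch ⟨hc, h⟩
          subst hc
          have hsp0 : pvSp ('"' :: rest) = [] :: pvSp rest := by simp [pvSp]
          rw [hsp0, ihr]
          rcases hsp : pvSp rest with _ | ⟨w, ps⟩
          · exact absurd hsp (pvSp_ne_nil rest)
          have hw : w = rest.takeWhile (· ≠ '"') := by
            have := pvSp_head rest
            rw [hsp] at this
            simpa using this
          have hwhead : w.head? ≠ some '$' := by
            subst hw
            rcases rest with _ | ⟨r, rs⟩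
            · simp
            · by_cases hr : r = '"'
              · simp [hr]
              · simp only [List.takeWhile_cons]
                rw [if_pos (by simpa using hr)]
                simpa using hh
          rcases ps with _ | ⟨p2, ps'⟩
          · rfl
          · rw [pvG]
            simp [hwhead]
        · -- ordinary character
          have hsp0 : pvSp (c :: rest) = (pvSp rest).modifyHead (c :: ·) := by
            simp [pvSp, hc]
          rw [hsp0, pvG_modifyHead, ihr]

lemma pvSlice_one_neg_one {α : Type} (l : List α) :
    PySem.List.slice l (some 1) (some (-1)) = l.tail.dropLast := by
  rcases l with _ | ⟨a, t⟩
  · rfl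
  · simp [PySem.List.slice, List.dropLast_eq_take]

lemma pvG_eq_filter (l : List (List Char)) :
    pvG l = (l.tail.dropLast.filter (fun p => p.head? = some '$')).map List.tail := by
  match l with
  | [] => rfl
  | [_] => rfl
  | [_, _] => rfl
  | a :: p :: q :: rest =>
      rw [pvG, pvG_eq_filter (p :: q :: rest)]
      simp only [List.tail_cons, List.dropLast_cons₂, List.filter_cons]
      by_cases h : p.head? = some '$' <;> simp [h]

-- ===== VERDICT (by name: the statement is the Claim_ definition above) =====
theorem get_expr_variables_spec : Claim_equal_get_expr_variables := by
  intro s _ hpre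
  show get_expr_variables s = get_expr_variables_alt s
  unfold get_expr_variables get_expr_variables_alt
  rw [pvSplitOn_eq_pvSp, pvSlice_one_neg_one]
  rw [PySem.List.foldl_append_if (fun seg => PySem.Chars.startswith seg ['$'])
        (fun seg => String.ofList (PySem.Chars.slice seg (some 1) none))]
  rw [pvScanA_eq_pvG s.toList hpre, pvG_eq_filter]
  simp only [List.nil_append, List.map_map]
  congr 1
  · funext seg
    simp [PySem.List.slice_from_one, Function.comp]
  · congr 1
    funext p
    rcases p with _ | ⟨x, xs⟩
    · simp [PySem.Chars.startswith, List.isPrefixOf]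
    · simp only [PySem.Chars.startswith, List.head?_cons, List.isPrefixOf, Bool.and_true]
      by_cases hx : x = '$' <;> simp [hx]
      exact fun h => hx h.symm
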